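-- pv_equiv track=rewrite | github.com/thuva4/am-i-bad-trader | scripts/analyze_portfolio.py | split_multi_exchange_tickers
-- ===== SOURCE A (Python) =====
-- _CURRENCY_SUFFIX = {"USD": "", "GBP": ".L", "GBX": ".L", "CAD": ".TO", "CHF": ".SW"}
--
-- _ISIN_SUFFIX = {"FR": ".PA", "DE": ".DE", "NL": ".AS", "ES": ".MC", "BE": ".BR",
--                 "IT": ".MI", "CH": ".SW", "IE": ".L", "GB": ".L"}
--
-- def _resolve_yahoo_symbol(ticker, currency, isin):
--     """Resolve Yahoo Finance symbol (lightweight copy for analysis script)."""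
--     if not ticker:
--         return ticker
--     if currency == "USD":
--         return ticker
--     yahoo_ticker = ticker.replace("/", "-")
--     if isin and len(isin) >= 2:
--         suffix = _ISIN_SUFFIX.get(isin[:2])
--         if suffix:
--             return f"{yahoo_ticker}{suffix}"
--     suffix = _CURRENCY_SUFFIX.get(currency, "")
--     if suffix:
--         return f"{yahoo_ticker}{suffix}"
--     return yahoo_ticker
--
-- def split_multi_exchange_tickers(actions):
--     """Split tickers traded on multiple exchanges into separate tickers.
--
--     When the same ticker (e.g., CNQ) has trades in different currencies
--     (USD on NYSE, CAD on TSX), rename each action's ticker to the resolved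
--     Yahoo symbol so they are treated as separate positions.
--     """
--     ticker_currencies = {}
--     for a in actions:
--         ticker = a.get("ticker", "")
--         if not ticker:
--             continue
--         tc = a.get("trade_currency", "") or a.get("currency", "")
--         if tc and a["action"] in ("BUY", "SELL"):
--             if ticker not in ticker_currencies:
--                 ticker_currencies[ticker] = set()
--             ticker_currencies[ticker].add(tc)
--
--     multi = {t for t, cs in ticker_currencies.items() if len(cs) > 1}
--     if not multi:
--         return 0
--
--     renamed = 0
--     for a in actions:
--         ticker = a.get("ticker", "")
--         if ticker not in multi:
--             continue
--         tc = a.get("trade_currency", "") or a.get("currency", "")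
--         isin = a.get("isin", "")
--         yahoo_sym = _resolve_yahoo_symbol(ticker, tc, isin)
--         if yahoo_sym != ticker:
--             a["ticker_original"] = ticker
--             a["ticker"] = yahoo_sym
--             renamed += 1
--
--     return renamed
-- ===== SOURCE B (Python) =====
-- _CURRENCY_SUFFIX = {"USD": "", "GBP": ".L", "GBX": ".L", "CAD": ".TO", "CHF": ".SW"}
--
-- _ISIN_SUFFIX = {"FR": ".PA", "DE": ".DE", "NL": ".AS", "ES": ".MC", "BE": ".BR",
--                 "IT": ".MI", "CH": ".SW", "IE": ".L", "GB": ".L"}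
--
-- def _resolve_yahoo_symbol(ticker, currency, isin):
--     if not ticker:
--         return ticker
--     if currency == "USD":
--         return ticker
--     yahoo_ticker = ticker.replace("/", "-")
--     if isin and len(isin) >= 2:
--         suffix = _ISIN_SUFFIX.get(isin[:2])
--         if suffix:
--             return f"{yahoo_ticker}{suffix}"
--     suffix = _CURRENCY_SUFFIX.get(currency, "")
--     if suffix:
--         return f"{yahoo_ticker}{suffix}"
--     return yahoo_ticker
--
--
-- def _trade_pair(a):
--     """(ticker, currency) of a qualifying trade, else None."""
--     ticker = a.get("ticker", "")
--     if not ticker: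
--         return None
--     tc = a.get("trade_currency", "") or a.get("currency", "")
--     if tc and a["action"] in ("BUY", "SELL"):
--         return (ticker, tc)
--     return None
--
--
-- def _rename(a, multi):
--     """Rename one action if its ticker is multi-exchange; return 1 if renamed."""
--     ticker = a.get("ticker", "")
--     if ticker not in multi:
--         return 0
--     tc = a.get("trade_currency", "") or a.get("currency", "")
--     sym = _resolve_yahoo_symbol(ticker, tc, a.get("isin", ""))
--     if sym == ticker:
--         return 0
--     a["ticker_original"] = ticker
--     a["ticker"] = sym
--     return 1
--
--
-- def split_multi_exchange_tickers(actions):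
--     # Declarative, dict-free detection: a ticker is multi-exchange iff two
--     # qualifying (ticker, currency) trade pairs witness the same ticker with
--     # two different currencies (pairwise existential instead of A's dict of
--     # per-ticker currency sets and len>1 filter).
--     pairs = [p for p in map(_trade_pair, actions) if p is not None]
--     multi = {t for (t, c) in pairs for (t2, c2) in pairs if t == t2 and c != c2}
--     return sum(_rename(a, multi) for a in actions)
-- ===== Notes on version B (the rewrite author's own statement) =====
-- stated objective: alternative
-- what changed: B drops A's dict of per-ticker currency sets, the len(cs)>1 filtering step and the early return entirely: it projects the actions to a flat list of qualifying (ticker, currency) pairs, detects multi-exchange tickers by a pairwise existential set comprehension (two pairs, same ticker, different currencies), and computes the rename count as a sum over a per-action helper.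
import Mathlib
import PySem

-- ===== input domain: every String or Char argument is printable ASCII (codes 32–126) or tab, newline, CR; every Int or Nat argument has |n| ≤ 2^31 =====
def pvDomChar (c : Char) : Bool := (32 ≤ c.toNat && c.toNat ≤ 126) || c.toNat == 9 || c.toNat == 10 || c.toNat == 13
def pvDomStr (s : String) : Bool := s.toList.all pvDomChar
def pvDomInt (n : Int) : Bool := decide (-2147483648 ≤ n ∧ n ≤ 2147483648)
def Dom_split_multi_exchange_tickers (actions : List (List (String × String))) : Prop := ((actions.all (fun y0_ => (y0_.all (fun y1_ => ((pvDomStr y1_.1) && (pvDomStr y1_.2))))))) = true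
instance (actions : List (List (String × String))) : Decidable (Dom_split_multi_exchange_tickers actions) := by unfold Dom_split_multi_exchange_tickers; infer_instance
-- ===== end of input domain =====

-- B replaces A's whole machinery — the dict of per-ticker currency sets, the
-- 'len(cs) > 1' set-comprehension and the early return — by a flat projection of the
-- actions to qualifying (ticker, currency) pairs, a pairwise-existential set
-- comprehension detecting a ticker seen with two different currencies, and a sum of a
-- per-action rename helper. Objective: alternative (declarative, dict-free; quadratic
-- detection). Both A and B also set a['ticker_original'] / a['ticker'] in place on
-- renamed actions (the same mutation); the equivalence proved is about the return value.

-- ===== PORT A =====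
-- module constants _CURRENCY_SUFFIX / _ISIN_SUFFIX
def pvCurrencySuffix : PySem.Dict String String :=
  PySem.Dict.ofList [("USD", ""), ("GBP", ".L"), ("GBX", ".L"), ("CAD", ".TO"), ("CHF", ".SW")]
def pvIsinSuffix : PySem.Dict String String :=
  PySem.Dict.ofList [("FR", ".PA"), ("DE", ".DE"), ("NL", ".AS"), ("ES", ".MC"), ("BE", ".BR"),
                     ("IT", ".MI"), ("CH", ".SW"), ("IE", ".L"), ("GB", ".L")]

-- _resolve_yahoo_symbol (helper shared verbatim by Source A and Source B)
def pvResolveYahooSymbol (ticker currency isin : String) : String :=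
  if ticker = "" then ticker
  else if currency = "USD" then ticker
  else
    let yahoo := PySem.Str.replace ticker "/" "-"
    -- 'if isin and len(isin) >= 2: suffix = _ISIN_SUFFIX.get(isin[:2]); if suffix: return …'
    let isinRes : Option String :=
      if isin ≠ "" ∧ 2 ≤ PySem.Str.len isin then
        match pvIsinSuffix.get? (PySem.Str.slice isin none (some 2)) with
        | some suf => if suf ≠ "" then some (yahoo ++ suf) else none
        | none => none
      else none
    match isinRes with
    | some r => r
    | none =>
      let suf := pvCurrencySuffix.getD currency ""
      if suf ≠ "" then yahoo ++ suf else yahoo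

-- tc = a.get("trade_currency", "") or a.get("currency", "")
def pvTradeCurrency (d : PySem.Dict String String) : String :=
  let t := d.getD "trade_currency" ""
  if t ≠ "" then t else d.getD "currency" ""

-- A's pass-1 loop body (a["action"] ported as getD "action" ""; a missing "action" key
-- raises KeyError in Python and is excluded by Pre_)
def pvStepA (st : PySem.Dict String (PySem.Set String)) (a : List (String × String)) :
    PySem.Dict String (PySem.Set String) :=
  let d := PySem.Dict.ofList a
  let ticker := d.getD "ticker" ""
  if ticker = "" then st
  else
    let tc := pvTradeCurrency d
    if tc ≠ "" ∧ (d.getD "action" "" = "BUY" ∨ d.getD "action" "" = "SELL") then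
      let st1 := if st.contains ticker then st else st.insert ticker PySem.Set.empty
      st1.insert ticker (PySem.Set.add (st1.getD ticker PySem.Set.empty) tc)
    else st

-- A's second-pass loop body (only `renamed` affects the return value — the in-place
-- renaming of `a` is a side effect on the argument)
def pvRenameStep (multi : PySem.Set String) (renamed : Int) (a : List (String × String)) : Int :=
  let d := PySem.Dict.ofList a
  let ticker := d.getD "ticker" ""
  if multi.contains ticker then
    let tc := pvTradeCurrency d
    let isin := d.getD "isin" ""
    let yahooSym := pvResolveYahooSymbol ticker tc isin
    if yahooSym ≠ ticker then renamed + 1 else renamed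
  else renamed

def split_multi_exchange_tickers (actions : List (List (String × String))) : Int :=
  let tickerCurrencies := actions.foldl pvStepA PySem.Dict.empty
  let multi : PySem.Set String :=
    PySem.Set.ofList
      (((tickerCurrencies.items.filter (fun p => 1 < PySem.Set.len p.2)).map Prod.fst))
  if multi = [] then 0
  else actions.foldl (fun renamed a => pvRenameStep multi renamed a) 0

-- ===== PORT B =====
-- _trade_pair: (ticker, currency) of a qualifying trade, else None
def pvTradePair (a : List (String × String)) : Option (String × String) :=
  let d := PySem.Dict.ofList a
  let ticker := d.getD "ticker" ""
  if ticker = "" then none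
  else
    let tc := pvTradeCurrency d
    if tc ≠ "" ∧ (d.getD "action" "" = "BUY" ∨ d.getD "action" "" = "SELL") then
      some (ticker, tc)
    else none

-- the pairwise set comprehension {t for (t,c) in pairs for (t2,c2) in pairs if t == t2 and c != c2}
def pvMulti (pairs : List (String × String)) : PySem.Set String :=
  pairs.foldl
    (fun s p =>
      pairs.foldl (fun s q => if p.1 = q.1 ∧ p.2 ≠ q.2 then PySem.Set.add s p.1 else s) s)
    PySem.Set.empty

-- _rename: 1 if the action was renamed, else 0 (mutation is a side effect on `a`)
def pvRenameVal (multi : PySem.Set String) (a : List (String × String)) : Int :=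
  let d := PySem.Dict.ofList a
  let ticker := d.getD "ticker" ""
  if multi.contains ticker then
    let tc := pvTradeCurrency d
    let sym := pvResolveYahooSymbol ticker tc (d.getD "isin" "")
    if sym = ticker then 0 else 1
  else 0

def split_multi_exchange_tickers_alt (actions : List (List (String × String))) : Int :=
  let pairs := actions.filterMap pvTradePair
  let multi := pvMulti pairs
  (actions.map (pvRenameVal multi)).sum

-- ===== PRECONDITION & SPEC =====
-- Pre_ excludes exactly the inputs on which Python A raises KeyError: an action whose
-- nonempty ticker and nonempty trade currency make a["action"] be read while the
-- "action" key is missing.  (B raises there too.)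
def Pre_split_multi_exchange_tickers (actions : List (List (String × String))) : Prop :=
  ∀ a ∈ actions,
    ((PySem.Dict.ofList a : PySem.Dict String String).getD "ticker" "" ≠ "" ∧
     pvTradeCurrency (PySem.Dict.ofList a) ≠ "") →
    (PySem.Dict.ofList a : PySem.Dict String String).contains "action" = true
instance (actions : List (List (String × String))) : Decidable (Pre_split_multi_exchange_tickers actions) := by unfold Pre_split_multi_exchange_tickers; infer_instance

def pvWitness_split_multi_exchange_tickers : (List (List (String × String))) :=
  [[("ticker", "CNQ"), ("action", "BUY"), ("trade_currency", "USD")],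
   [("ticker", "CNQ"), ("action", "SELL"), ("trade_currency", "CAD")]]

def Spec_split_multi_exchange_tickers (actions : List (List (String × String))) (out : Int) : Prop := out = split_multi_exchange_tickers_alt actions
instance (actions : List (List (String × String))) (out : Int) : Decidable (Spec_split_multi_exchange_tickers actions out) := by unfold Spec_split_multi_exchange_tickers; infer_instance

-- ===== CLAIM (what is proved, stated in full; the proofs are below) =====
def Claim_equal_split_multi_exchange_tickers : Prop := ∀ (actions : List (List (String × String))), Dom_split_multi_exchange_tickers actions → Pre_split_multi_exchange_tickers actions → Spec_split_multi_exchange_tickers actions (split_multi_exchange_tickers actions)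

-- ===== LEMMAS AND PROOFS =====

-- the currencies A accumulates for ticker t, expressed over the projected pairs
def pvCur (ps : List (String × String)) (t : String) : PySem.Set String :=
  ps.foldl (fun s p => if p.1 = t then PySem.Set.add s p.2 else s) PySem.Set.empty

theorem pv_add_ne_nil (s : PySem.Set String) (c : String) : PySem.Set.add s c ≠ [] := by
  rw [PySem.Set.add_eq_ite]
  split
  · rename_i h; intro hn; rw [hn] at h; exact absurd h (List.not_mem_nil)
  · simp

theorem pvCur_append (ps : List (String × String)) (p : String × String) (t : String) :
    pvCur (ps ++ [p]) t = if p.1 = t then PySem.Set.add (pvCur ps t) p.2 else pvCur ps t := by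
  simp [pvCur, List.foldl_append]

-- membership in a conditional-add fold (used for pvCur and for pvMulti's two folds)
theorem pv_mem_foldl {α : Type} (l : List α) (g : PySem.Set String → α → PySem.Set String)
    (Q : α → Prop) (x : String) (h : ∀ s y, x ∈ g s y ↔ x ∈ s ∨ Q y) :
    ∀ s0 : PySem.Set String, x ∈ l.foldl g s0 ↔ x ∈ s0 ∨ ∃ y ∈ l, Q y := by
  induction l with
  | nil => simp
  | cons a t ih =>
    intro s0
    rw [List.foldl_cons, ih (g s0 a), h]
    simp only [List.mem_cons]
    constructor
    · rintro ((hs | hq) | ⟨y, hy, hQ⟩)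
      · exact Or.inl hs
      · exact Or.inr ⟨a, Or.inl rfl, hq⟩
      · exact Or.inr ⟨y, Or.inr hy, hQ⟩
    · rintro (hs | ⟨y, (rfl | hy), hQ⟩)
      · exact Or.inl (Or.inl hs)
      · exact Or.inl (Or.inr hQ)
      · exact Or.inr ⟨y, hy, hQ⟩

theorem pv_nodup_foldl {α : Type} (l : List α) (P : α → Prop) [DecidablePred P] (f : α → String) :
    ∀ s0 : PySem.Set String, s0.Nodup →
      (l.foldl (fun s p => if P p then PySem.Set.add s (f p) else s) s0).Nodup := by
  induction l with
  | nil => intro s0 h; exact h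
  | cons a t ih =>
    intro s0 h
    rw [List.foldl_cons]
    apply ih
    split
    · exact PySem.Set.nodup_add _ _ h
    · exact h

theorem pvCur_nodup (ps : List (String × String)) (t : String) : (pvCur ps t).Nodup :=
  pv_nodup_foldl ps (fun p => p.1 = t) (fun p => p.2) PySem.Set.empty List.nodup_nil

theorem pv_mem_pvCur (ps : List (String × String)) (t c : String) :
    c ∈ pvCur ps t ↔ ∃ p ∈ ps, p.1 = t ∧ p.2 = c := by
  have h := pv_mem_foldl ps (fun s p => if p.1 = t then PySem.Set.add s p.2 else s)
    (fun p => p.1 = t ∧ p.2 = c) c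
    (by
      intro s y
      show c ∈ (if y.1 = t then PySem.Set.add s y.2 else s) ↔ c ∈ s ∨ (y.1 = t ∧ y.2 = c)
      split
      · rename_i hy; rw [PySem.Set.mem_add]; tauto
      · rename_i hy; tauto)
    PySem.Set.empty
  rw [pvCur, h]
  simp [PySem.Set.empty]

theorem pv_one_lt_length_iff {l : List String} (h : l.Nodup) :
    1 < l.length ↔ ∃ a ∈ l, ∃ b ∈ l, a ≠ b := by
  cases l with
  | nil => simp
  | cons x t =>
    cases t with
    | nil => simp
    | cons y u =>
      simp only [List.nodup_cons, List.mem_cons] at h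
      constructor
      · intro _
        refine ⟨x, by simp, y, by simp, fun hxy => h.1 ?_⟩
        rw [hxy]; simp
      · intro _
        simp only [List.length_cons]
        omega

-- 1 < |currencies of t| ↔ two qualifying pairs witness t with different currencies
theorem pv_one_lt_pvCur_iff (ps : List (String × String)) (t : String) :
    1 < (pvCur ps t).length ↔
      ∃ p ∈ ps, ∃ q ∈ ps, p.1 = t ∧ q.1 = t ∧ p.2 ≠ q.2 := by
  rw [pv_one_lt_length_iff (pvCur_nodup ps t)]
  constructor
  · rintro ⟨c1, h1, c2, h2, hne⟩
    obtain ⟨p, hp, hpt, hpc⟩ := (pv_mem_pvCur ps t c1).mp h1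
    obtain ⟨q, hq, hqt, hqc⟩ := (pv_mem_pvCur ps t c2).mp h2
    exact ⟨p, hp, q, hq, hpt, hqt, by rw [hpc, hqc]; exact hne⟩
  · rintro ⟨p, hp, q, hq, hpt, hqt, hne⟩
    exact ⟨p.2, (pv_mem_pvCur ps t p.2).mpr ⟨p, hp, hpt, rfl⟩,
           q.2, (pv_mem_pvCur ps t q.2).mpr ⟨q, hq, hqt, rfl⟩, hne⟩

-- membership in B's pairwise set comprehension
theorem pv_mem_pvMulti (ps : List (String × String)) (x : String) :
    x ∈ pvMulti ps ↔ ∃ p ∈ ps, ∃ q ∈ ps, p.1 = x ∧ q.1 = x ∧ p.2 ≠ q.2 := by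
  have hout := pv_mem_foldl ps
    (fun s p => ps.foldl (fun s q => if p.1 = q.1 ∧ p.2 ≠ q.2 then PySem.Set.add s p.1 else s) s)
    (fun p => ∃ q ∈ ps, (p.1 = q.1 ∧ p.2 ≠ q.2) ∧ p.1 = x) x
    (by
      intro s p
      exact pv_mem_foldl ps _ (fun q => (p.1 = q.1 ∧ p.2 ≠ q.2) ∧ p.1 = x) x
        (by
          intro s' q
          show x ∈ (if p.1 = q.1 ∧ p.2 ≠ q.2 then PySem.Set.add s' p.1 else s') ↔
            x ∈ s' ∨ ((p.1 = q.1 ∧ p.2 ≠ q.2) ∧ p.1 = x)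
          split
          · rename_i hc; rw [PySem.Set.mem_add]; tauto
          · rename_i hc; tauto) s)
    PySem.Set.empty
  rw [pvMulti, hout]
  simp only [PySem.Set.empty, List.not_mem_nil, false_or]
  constructor
  · rintro ⟨p, hp, q, hq, ⟨heq, hne⟩, hx⟩
    exact ⟨p, hp, q, hq, hx, by rw [← heq]; exact hx, hne⟩
  · rintro ⟨p, hp, q, hq, hpx, hqx, hne⟩
    exact ⟨p, hp, q, hq, ⟨by rw [hpx, hqx], hne⟩, hpx⟩

-- A's pass-1 step IS the pvTradePair projection followed by a set-augmenting insert
theorem pvStepA_eq (tcd : PySem.Dict String (PySem.Set String)) (a : List (String × String)) :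
    pvStepA tcd a = match pvTradePair a with
      | none => tcd
      | some p => tcd.insert p.1 (PySem.Set.add (tcd.getD p.1 PySem.Set.empty) p.2) := by
  simp only [pvStepA, pvTradePair]
  by_cases h0 : (PySem.Dict.ofList a : PySem.Dict String String).getD "ticker" "" = ""
  · rw [if_pos h0, if_pos h0]
  · rw [if_neg h0, if_neg h0]
    set d := (PySem.Dict.ofList a : PySem.Dict String String)
    set k := d.getD "ticker" ""
    by_cases h1 : pvTradeCurrency d ≠ "" ∧ (d.getD "action" "" = "BUY" ∨ d.getD "action" "" = "SELL")
    · rw [if_pos h1, if_pos h1]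
      by_cases hc : tcd.contains k
      · rw [if_pos hc]
      · rw [if_neg hc]
        simp only
        rw [PySem.Dict.getD_insert_self, PySem.Dict.insert_insert_self,
            PySem.Dict.getD_of_not_contains tcd PySem.Set.empty (by simpa using hc)]
    · rw [if_neg h1, if_neg h1]

-- the pass-1 invariant: A's dict entry for any t is exactly pvCur of the pairs so far
def pvInvA (tcd : PySem.Dict String (PySem.Set String)) (ps : List (String × String)) : Prop :=
  tcd.keys.Nodup ∧
  ∀ t, tcd.get? t = if pvCur ps t = [] then none else some (pvCur ps t)

theorem pvInvA_foldl (acts : List (List (String × String))) :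
    ∀ (tcd : PySem.Dict String (PySem.Set String)) (ps : List (String × String)),
      pvInvA tcd ps → pvInvA (acts.foldl pvStepA tcd) (ps ++ acts.filterMap pvTradePair) := by
  induction acts with
  | nil => intro tcd ps h; simpa using h
  | cons a rest ih =>
    intro tcd ps h
    rw [List.foldl_cons, List.filterMap_cons]
    cases hp : pvTradePair a with
    | none =>
      have hstep : pvStepA tcd a = tcd := by rw [pvStepA_eq, hp]
      rw [hstep]
      exact ih tcd ps h
    | some p =>
      have hstep : pvStepA tcd a =
          tcd.insert p.1 (PySem.Set.add (tcd.getD p.1 PySem.Set.empty) p.2) := by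
        rw [pvStepA_eq, hp]
      have hgd : tcd.getD p.1 PySem.Set.empty = pvCur ps p.1 := by
        rw [PySem.Dict.getD_eq_get?_getD, h.2 p.1]
        split
        · rename_i he; rw [he]; rfl
        · rfl
      have h' : pvInvA (pvStepA tcd a) (ps ++ [p]) := by
        rw [hstep]
        refine ⟨PySem.Dict.nodup_keys_insert tcd p.1 _ h.1, fun t => ?_⟩
        by_cases ht : t = p.1
        · subst ht
          rw [PySem.Dict.get?_insert_self, hgd, pvCur_append, if_pos rfl,
              if_neg (pv_add_ne_nil _ _)]
        · have hcur : pvCur (ps ++ [p]) t = pvCur ps t := by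
            rw [pvCur_append]
            exact if_neg (fun hq => ht hq.symm)
          rw [hcur, PySem.Dict.get?_insert_of_ne _ _ ht, h.2 t]
      have := ih _ _ h'
      simpa [List.append_assoc] using this

theorem pvInvA_init : pvInvA PySem.Dict.empty [] := by
  refine ⟨by simp [PySem.Dict.keys_empty], fun t => ?_⟩
  rw [PySem.Dict.get?_empty]
  simp [pvCur, PySem.Set.empty]

-- membership in A's 'multi' set, from the items of the pass-1 dict
theorem pv_mem_multiA (tcd : PySem.Dict String (PySem.Set String)) (hnd : tcd.keys.Nodup)
    (t : String) :
    (t ∈ PySem.Set.ofList ((tcd.items.filter (fun p => 1 < PySem.Set.len p.2)).map Prod.fst)) ↔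
      ∃ s, tcd.get? t = some s ∧ 1 < s.length := by
  rw [PySem.Set.mem_ofList]
  simp only [List.mem_map, List.mem_filter]
  constructor
  · rintro ⟨⟨k, s⟩, ⟨hmem, hlen⟩, rfl⟩
    exact ⟨s, PySem.Dict.get?_of_mem_items tcd hmem hnd, by simpa [PySem.Set.len] using hlen⟩
  · rintro ⟨s, hget, hlen⟩
    exact ⟨(t, s), ⟨PySem.Dict.mem_items_of_get?_eq_some tcd hget,
      by simpa [PySem.Set.len] using hlen⟩, rfl⟩

-- A's second-pass step adds B's per-action rename value
theorem pvRenameStep_eq (multi : PySem.Set String) (r : Int) (a : List (String × String)) :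
    pvRenameStep multi r a = r + pvRenameVal multi a := by
  simp only [pvRenameStep, pvRenameVal]
  split_ifs <;> first | omega | tauto

theorem pvRenameVal_congr (m1 m2 : PySem.Set String)
    (h : ∀ x, m1.contains x = m2.contains x) (a : List (String × String)) :
    pvRenameVal m1 a = pvRenameVal m2 a := by
  simp only [pvRenameVal, h]

-- ===== VERDICT (by name: the statement is the Claim_ definition above) =====
theorem split_multi_exchange_tickers_spec : Claim_equal_split_multi_exchange_tickers := by
  intro actions _ _
  simp only [Spec_split_multi_exchange_tickers, split_multi_exchange_tickers,
    split_multi_exchange_tickers_alt]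
  set pairs := actions.filterMap pvTradePair with hpairs
  obtain ⟨hnd, hinv⟩ := by
    have := pvInvA_foldl actions PySem.Dict.empty [] pvInvA_init
    simpa using this
  set tcd := actions.foldl pvStepA PySem.Dict.empty with htcd
  set multiA : PySem.Set String :=
    PySem.Set.ofList ((tcd.items.filter (fun p => 1 < PySem.Set.len p.2)).map Prod.fst) with hmA
  set multiB := pvMulti pairs with hmB
  -- the two multi sets have the same members
  have hmem : ∀ t, t ∈ multiA ↔ t ∈ multiB := by
    intro t
    rw [hmA, pv_mem_multiA tcd hnd t, hmB, pv_mem_pvMulti]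
    rw [← pv_one_lt_pvCur_iff]
    constructor
    · rintro ⟨s, hget, hlen⟩
      rw [hinv t] at hget
      split at hget
      · exact absurd hget (by simp)
      · rw [← Option.some.inj hget] at hlen; exact hlen
    · intro hl
      refine ⟨pvCur pairs t, ?_, hl⟩
      rw [hinv t, if_neg ?_]
      intro he
      rw [he] at hl
      simp at hl
  have hcont : ∀ x, multiA.contains x = multiB.contains x := by
    intro x
    rw [Bool.eq_iff_iff, PySem.Set.contains_iff, PySem.Set.contains_iff]
    exact hmem x
  by_cases he : multiA = []
  · rw [if_pos he]
    have hzero : ∀ a ∈ actions, pvRenameVal multiB a = 0 := by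
      intro a _
      rw [← pvRenameVal_congr multiA multiB hcont a]
      simp only [pvRenameVal, he]
      rw [if_neg (by simp [PySem.Set.contains])]
    rw [List.map_congr_left hzero, PySem.List.sum_map_const_int]
    simp
  · rw [if_neg he]
    have hstep : (fun (renamed : Int) a => pvRenameStep multiA renamed a) =
        fun (renamed : Int) a => renamed + pvRenameVal multiA a := by
      funext r a; exact pvRenameStep_eq multiA r a
    rw [hstep, PySem.List.foldl_add, zero_add]
    exact congrArg List.sum (List.map_congr_left
      (fun a _ => pvRenameVal_congr multiA multiB hcont a))
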